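-- pv_equiv track=rewrite | github.com/TrueBurn/codebase-scribe-ai | src/utils/tree_formatter.py | format_project_structure
-- ===== SOURCE A (Python) =====
-- from typing import Dict, List, Optional, Tuple, Any
--
-- def _format_tree_node(node: Dict, lines: List[str], prefix: str, name: str) -> None:
--     """
--     Recursively format a tree node.
--
--     Args:
--         node: Dictionary representing a directory or file
--         lines: List to append formatted lines to
--         prefix: Prefix string for the current line (for drawing the tree)
--         name: Name of the current node
--     """
--     if name:
--         # Add the current node to the output
--         if name != "__files__":
--             lines.append(f"{prefix}{name}")
--
--     # Process files in this directory
--     if '__files__' in node: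
--         files = sorted(node['__files__'])
--         for i, file in enumerate(files):
--             is_last = i == len(files) - 1 and len([k for k in node.keys() if k != '__files__']) == 0
--             if is_last:
--                 lines.append(f"{prefix}└── {file}")
--             else:
--                 lines.append(f"{prefix}├── {file}")
--
--     # Process subdirectories
--     dirs = sorted([k for k in node.keys() if k != '__files__'])
--     for i, dir_name in enumerate(dirs):
--         is_last = i == len(dirs) - 1
--
--         if is_last:
--             # Last item gets a corner piece
--             lines.append(f"{prefix}└── {dir_name}/")
--             _format_tree_node(node[dir_name], lines, f"{prefix}    ", "")
--         else:
--             # Non-last items get a T-piece and vertical line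
--             lines.append(f"{prefix}├── {dir_name}/")
--             _format_tree_node(node[dir_name], lines, f"{prefix}│   ", "")
--
-- def format_project_structure(file_paths: List[str]) -> str:
--     """
--     Format a list of file paths into a visually clear tree structure.
--
--     Args:
--         file_paths: List of file paths
--
--     Returns:
--         A formatted string representing the project structure with clear hierarchy
--     """
--     # Create a nested dictionary to represent the directory structure
--     root = {}
--
--     for path in file_paths:
--         path = path.replace('\\', '/')
--         parts = path.split('/')
--         current = root
--
--         # Build the tree structure
--         for i, part in enumerate(parts):
--             if i == len(parts) - 1:  # Last part (file)
--                 if '__files__' not in current: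
--                     current['__files__'] = []
--                 current['__files__'].append(part)
--             else:  # Directory
--                 if part not in current:
--                     current[part] = {}
--                 current = current[part]
--
--     # Format the tree
--     lines = []
--     _format_tree_node(root, lines, "", "")
--
--     return '\n'.join(lines)
-- ===== SOURCE B (Python) =====
-- def format_project_structure(file_paths):
--     """Format file paths into an ASCII tree by recursive grouping of path
--     segments, without building A's nested-dict intermediate."""
--     def render(prefix, pss):
--         lines = []
--         files = sorted(s[0] for s in pss if len(s) == 1)
--         names = sorted(dict.fromkeys(s[0] for s in pss if len(s) > 1))
--         for i, f in enumerate(files):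
--             last = i == len(files) - 1 and not names
--             lines.append(prefix + ("└── " if last else "├── ") + f)
--         for i, n in enumerate(names):
--             group = [s[1:] for s in pss if len(s) > 1 and s[0] == n]
--             if i == len(names) - 1:
--                 lines.append(prefix + "└── " + n + "/")
--                 lines.extend(render(prefix + "    ", group))
--             else:
--                 lines.append(prefix + "├── " + n + "/")
--                 lines.extend(render(prefix + "│   ", group))
--         return lines
--     pss = [p.replace("\\", "/").split("/") for p in file_paths]
--     return "\n".join(render("", pss))
-- ===== Notes on version B (the rewrite author's own statement) =====
-- stated objective: alternative
-- what changed: B drops A's nested-dict tree build entirely: it normalizes and splits each path once, then a single recursive renderer partitions the current level's segment lists into files and groups-by-first-segment and emits lines directly, instead of A's two phases (imperative dict insertion walk, then recursive dict-tree formatter).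
-- outside the precondition, e.g. on format_project_structure(['__files__/a']): A returns '└── __files__', B returns '└── __files__/\n    └── a'
import Mathlib
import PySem

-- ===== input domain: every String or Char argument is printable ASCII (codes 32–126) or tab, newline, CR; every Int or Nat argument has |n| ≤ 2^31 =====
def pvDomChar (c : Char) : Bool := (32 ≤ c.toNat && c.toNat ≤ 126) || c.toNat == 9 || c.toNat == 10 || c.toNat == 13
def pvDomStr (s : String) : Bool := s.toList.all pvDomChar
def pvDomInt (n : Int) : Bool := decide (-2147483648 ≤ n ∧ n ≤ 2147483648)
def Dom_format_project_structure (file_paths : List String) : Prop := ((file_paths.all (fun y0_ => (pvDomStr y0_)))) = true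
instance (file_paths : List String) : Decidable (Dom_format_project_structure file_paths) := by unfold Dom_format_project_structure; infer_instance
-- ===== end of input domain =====

-- B replaces A's two-phase nested-dict build + dict-tree formatter by one recursive
-- renderer over lists of path segments (objective: alternative, same cost).

-- ===== PORT A =====
-- A's nested dict maps names to sub-dicts, plus the '__files__' sentinel key holding a
-- list. The port models a node as (files, children); this is exact as long as no path
-- uses '__files__' as a DIRECTORY component (guaranteed by Pre_ below; outside it the
-- Python either raises TypeError/AttributeError or misrenders via the sentinel clash).
mutual
inductive PNode : Type where
  | mk : List String → PChildren → PNode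
  deriving Repr
inductive PChildren : Type where
  | nil : PChildren
  | cons : String → PNode → PChildren → PChildren
  deriving Repr
end

def PNode.files : PNode → List String
  | .mk fs _ => fs

def PNode.children : PNode → PChildren
  | .mk _ cs => cs

def PNode.empty : PNode := .mk [] .nil

def PChildren.lookup : PChildren → String → Option PNode
  | .nil, _ => none
  | .cons d c cs, k => if k = d then some c else cs.lookup k

-- replace the value at an existing key, keeping dict insertion order (Python in-place update)
def PChildren.set : PChildren → String → PNode → PChildren
  | .nil, _, _ => .nil
  | .cons d c cs, k, v => if k = d then .cons d v cs else .cons d c (cs.set k v)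

-- add a new key at the end (Python dict insertion of a fresh key)
def PChildren.push : PChildren → String → PNode → PChildren
  | .nil, k, v => .cons k v .nil
  | .cons d c cs, k, v => .cons d c (cs.push k v)

def PChildren.keys : PChildren → List String
  | .nil => []
  | .cons d _ cs => d :: cs.keys

mutual
def PNode.size : PNode → Nat
  | .mk _ cs => cs.size + 1
def PChildren.size : PChildren → Nat
  | .nil => 0
  | .cons _ c cs => c.size + cs.size
end

-- the inner 'for i, part in enumerate(parts)' walk of A, as recursion on the parts
def insertParts : PNode → List String → PNode
  | n, [] => n
  | .mk fs cs, [f] => .mk (fs ++ [f]) cs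
  | .mk fs cs, d :: e :: tl =>
    match cs.lookup d with
    | some c => .mk fs (cs.set d (insertParts c (e :: tl)))
    | none   => .mk fs (cs.push d (insertParts PNode.empty (e :: tl)))

theorem lookup_size_le : ∀ (cs : PChildren) (k : String) (c : PNode),
    cs.lookup k = some c → c.size ≤ cs.size
  | .nil, _, _, h => by simp [PChildren.lookup] at h
  | .cons d c' cs, k, c, h => by
    simp only [PChildren.lookup] at h
    split at h
    · cases h; simp [PChildren.size]
    · have := lookup_size_le cs k c h
      simp [PChildren.size]; omega

theorem children_size_lt (n : PNode) : n.children.size < n.size := by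
  cases n; simp [PNode.children, PNode.size]

-- A's _format_tree_node: files first (sorted), then sorted subdirectory keys with
-- the enumerate/is_last loops written as [x] / x :: rest recursions.
def fileLinesA : List String → Bool → String → List String
  | [], _, _ => []
  | [f], noDirs, pre => [pre ++ (if noDirs then "└── " else "├── ") ++ f]
  | f :: g :: t, noDirs, pre => (pre ++ "├── " ++ f) :: fileLinesA (g :: t) noDirs pre

mutual
def renderA (n : PNode) (pre : String) (name : String) : List String :=
  (if name ≠ "" ∧ name ≠ "__files__" then [pre ++ name] else []) ++
  fileLinesA (PySem.List.sorted n.files (fun x => x) false) n.children.keys.isEmpty pre ++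
  renderDirsA n.children (PySem.List.sorted n.children.keys (fun x => x) false) pre
termination_by (n.size, 0)
decreasing_by
  exact Prod.Lex.left _ _ (children_size_lt n)
def renderDirsA (cs : PChildren) (ds : List String) (pre : String) : List String :=
  match ds with
  | [] => []
  | [d] =>
    (pre ++ "└── " ++ d ++ "/") ::
      (match h : cs.lookup d with
       | some c => renderA c (pre ++ "    ") ""
       | none => [])           -- unreachable: ds enumerates cs's keys
  | d :: e :: t =>
    ((pre ++ "├── " ++ d ++ "/") ::
      (match h : cs.lookup d with
       | some c => renderA c (pre ++ "│   ") ""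
       | none => [])) ++ renderDirsA cs (e :: t) pre
termination_by (cs.size, ds.length + 1)
decreasing_by
  · rcases Nat.lt_or_ge c.size cs.size with hlt | hge
    · exact Prod.Lex.left _ _ hlt
    · rw [Nat.le_antisymm (lookup_size_le cs d c h) hge]
      exact Prod.Lex.right _ (Nat.succ_pos _)
  · rcases Nat.lt_or_ge c.size cs.size with hlt | hge
    · exact Prod.Lex.left _ _ hlt
    · rw [Nat.le_antisymm (lookup_size_le cs d c h) hge]
      exact Prod.Lex.right _ (Nat.succ_pos _)
  · exact Prod.Lex.right _ (Nat.succ_lt_succ (Nat.lt_succ_self _))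
end

def format_project_structure (file_paths : List String) : String :=
  let root := file_paths.foldl
    (fun cur p => insertParts cur ((PySem.Str.split? (PySem.Str.replace p "\\" "/") "/").getD []))
    PNode.empty
  PySem.Str.join "\n" (renderA root "" "")

-- ===== PORT B =====
def segs (p : String) : List String :=
  (PySem.Str.split? (PySem.Str.replace p "\\" "/") "/").getD []

-- s[0] for s in pss if len(s) == 1
def singlesOf (pss : List (List String)) : List String :=
  pss.filterMap (fun s => if s.length = 1 then some (s.headD "") else none)

-- s[0] for s in pss if len(s) > 1
def headsOf (pss : List (List String)) : List String :=
  pss.filterMap (fun s => if 1 < s.length then some (s.headD "") else none)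

-- [s[1:] for s in pss if len(s) > 1 and s[0] == d]
def groupOf (d : String) (pss : List (List String)) : List (List String) :=
  pss.filterMap (fun s => if 1 < s.length ∧ s.headD "" = d then some s.tail else none)

-- sorted(dict.fromkeys(...))
def namesOf (pss : List (List String)) : List String :=
  PySem.List.sorted (PySem.List.dedup (headsOf pss)) (fun x => x) false

-- B's 'for i, f in enumerate(files)' loop, as a map over the index-decorated list
def fileLinesB (files : List String) (noDirs : Bool) (pre : String) : List String :=
  files.zipIdx.map (fun fi =>
    if fi.2 = files.length - 1 ∧ noDirs = true then pre ++ "└── " ++ fi.1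
    else pre ++ "├── " ++ fi.1)

def sumM (pss : List (List String)) : Nat := (pss.map (fun s => s.length + 1)).sum

theorem sumM_cons (s : List String) (t : List (List String)) :
    sumM (s :: t) = s.length + 1 + sumM t := by
  simp [sumM]

theorem groupOf_cons (k : String) (s : List String) (t : List (List String)) :
    groupOf k (s :: t) =
      if 1 < s.length ∧ s.headD "" = k then s.tail :: groupOf k t else groupOf k t := by
  by_cases hc : 1 < s.length ∧ s.headD "" = k
  · rw [if_pos hc]
    exact List.filterMap_cons_some (if_pos hc)
  · rw [if_neg hc]
    exact List.filterMap_cons_none (if_neg hc)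

theorem sumM_groupOf_le (d : String) : ∀ pss, sumM (groupOf d pss) ≤ sumM pss
  | [] => Nat.le_refl _
  | s :: t => by
    have ih := sumM_groupOf_le d t
    rw [groupOf_cons, sumM_cons]
    by_cases hc : 1 < s.length ∧ s.headD "" = d
    · rw [if_pos hc, sumM_cons]
      exact Nat.add_le_add
        (Nat.add_le_add_right (List.tail_sublist s).length_le 1) ih
    · rw [if_neg hc]
      exact Nat.le_trans ih (Nat.le_add_left _ _)

theorem sumM_groupOf_lt (d : String) : ∀ pss, (∃ s ∈ pss, 1 < s.length ∧ s.headD "" = d) →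
    sumM (groupOf d pss) < sumM pss := by
  intro pss h
  induction pss with
  | nil => exact absurd h (by simp)
  | cons s t ih =>
    rcases h with ⟨w, hw, hlen, hhd⟩
    rw [groupOf_cons, sumM_cons]
    rcases List.mem_cons.mp hw with rfl | hwt
    · rw [if_pos ⟨hlen, hhd⟩, sumM_cons]
      have h1 : w.tail.length + 1 ≤ w.length := by
        rw [List.length_tail]
        exact Nat.le_of_eq (Nat.succ_pred_eq_of_pos (Nat.lt_of_lt_of_le Nat.one_pos
          (Nat.le_of_lt hlen)))
      calc w.tail.length + 1 + sumM (groupOf d t)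
          ≤ w.length + sumM t := Nat.add_le_add h1 (sumM_groupOf_le d t)
        _ < w.length + 1 + sumM t :=
            Nat.add_lt_add_right (Nat.lt_succ_self _) _
    · have hlt := ih ⟨w, hwt, hlen, hhd⟩
      by_cases hc : 1 < s.length ∧ s.headD "" = d
      · rw [if_pos hc, sumM_cons]
        exact Nat.add_lt_add_of_le_of_lt
          (Nat.add_le_add_right (List.tail_sublist s).length_le 1) hlt
      · rw [if_neg hc]
        exact Nat.lt_of_lt_of_le hlt (Nat.le_add_left _ _)

theorem mem_namesOf {d : String} {pss : List (List String)} (h : d ∈ namesOf pss) :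
    ∃ s ∈ pss, 1 < s.length ∧ s.headD "" = d := by
  unfold namesOf at h
  rw [PySem.List.mem_sorted, PySem.List.mem_dedup] at h
  unfold headsOf at h
  rw [List.mem_filterMap] at h
  rcases h with ⟨s, hs, heq⟩
  by_cases hl : 1 < s.length
  · rw [if_pos hl] at heq; exact ⟨s, hs, hl, by cases heq; rfl⟩
  · rw [if_neg hl] at heq; cases heq

-- B's recursive renderer: split the current level into files and groups by first
-- segment, emit files then the sorted group names, recursing into each group.
mutual
def renderB (pre : String) (pss : List (List String)) : List String :=
  fileLinesB (PySem.List.sorted (singlesOf pss) (fun x => x) false) (namesOf pss).isEmpty pre ++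
  goB pre pss (namesOf pss).attach
termination_by (sumM pss, 1, 0)
decreasing_by
  exact Prod.Lex.right _ (Prod.Lex.left _ _ Nat.zero_lt_one)
def goB (pre : String) (pss : List (List String)) :
    List {d : String // d ∈ namesOf pss} → List String
  | [] => []
  | [⟨d, _⟩] =>
    (pre ++ "└── " ++ d ++ "/") :: renderB (pre ++ "    ") (groupOf d pss)
  | ⟨d, _⟩ :: e :: t =>
    ((pre ++ "├── " ++ d ++ "/") :: renderB (pre ++ "│   ") (groupOf d pss)) ++
      goB pre pss (e :: t)
termination_by l => (sumM pss, 0, l.length)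
decreasing_by
  · exact Prod.Lex.left _ _ (sumM_groupOf_lt _ _ (mem_namesOf ‹_›))
  · exact Prod.Lex.left _ _ (sumM_groupOf_lt _ _ (mem_namesOf ‹_›))
  · exact Prod.Lex.right _ (Prod.Lex.right _ (Nat.lt_succ_self _))
end

def format_project_structure_alt (file_paths : List String) : String :=
  PySem.Str.join "\n" (renderB "" (file_paths.map segs))

-- ===== PRECONDITION & SPEC =====
-- Pre_ excludes paths with a directory (non-final) component equal to '__files__',
-- A's internal sentinel key: on such inputs A either raises (TypeError/AttributeError)
-- or silently misrenders the subtree through the sentinel clash, an artefact no caller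
-- would specify; the Lean model of A is exact only on Pre_.
def Pre_format_project_structure (file_paths : List String) : Prop :=
  ∀ p ∈ file_paths,
    "__files__" ∉ ((PySem.Str.split? (PySem.Str.replace p "\\" "/") "/").getD []).dropLast
instance (file_paths : List String) : Decidable (Pre_format_project_structure file_paths) := by
  unfold Pre_format_project_structure; infer_instance
def pvWitness_format_project_structure : List String := ["src/main.py", "README.md"]
def Spec_format_project_structure (file_paths : List String) (out : String) : Prop :=
  out = format_project_structure_alt file_paths
instance (file_paths : List String) (out : String) :
    Decidable (Spec_format_project_structure file_paths out) := by
  unfold Spec_format_project_structure; infer_instance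

-- ===== CLAIM (what is proved, stated in full; the proofs are below) =====
def Claim_equal_format_project_structure : Prop :=
  ∀ (file_paths : List String), Dom_format_project_structure file_paths →
    Pre_format_project_structure file_paths →
    Spec_format_project_structure file_paths (format_project_structure file_paths)

-- ===== LEMMAS AND PROOFS =====

theorem keys_set : ∀ (cs : PChildren) (k : String) (v : PNode),
    (cs.set k v).keys = cs.keys
  | .nil, _, _ => rfl
  | .cons d c t, k, v => by
    simp only [PChildren.set]
    split
    · rfl
    · simp [PChildren.keys, keys_set t k v]

theorem keys_push : ∀ (cs : PChildren) (k : String) (v : PNode),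
    (cs.push k v).keys = cs.keys ++ [k]
  | .nil, _, _ => rfl
  | .cons d c t, k, v => by
    simp [PChildren.push, PChildren.keys, keys_push t k v]

theorem lookup_set : ∀ (cs : PChildren) (k j : String) (v : PNode),
    (cs.set k v).lookup j =
      if j = k then (cs.lookup k).map (fun _ => v) else cs.lookup j
  | .nil, k, j, v => by
    simp only [PChildren.set, PChildren.lookup, Option.map_none]
    split <;> rfl
  | .cons d c t, k, j, v => by
    simp only [PChildren.set]
    by_cases hkd : k = d
    · subst hkd
      rw [if_pos rfl]
      simp only [PChildren.lookup, if_pos rfl]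
      by_cases hjk : j = k
      · rw [if_pos hjk, if_pos hjk]; simp
      · rw [if_neg hjk, if_neg hjk, if_neg hjk]
    · rw [if_neg hkd]
      simp only [PChildren.lookup, lookup_set t k j v]
      by_cases hjd : j = d
      · rw [if_pos hjd, if_pos hjd]
        have hjk : ¬ j = k := fun h => hkd (hjd ▸ h.symm ▸ rfl)
        rw [if_neg hjk]
      · rw [if_neg hjd]
        by_cases hjk : j = k
        · rw [if_pos hjk, if_pos hjk, if_neg hkd]
        · rw [if_neg hjk, if_neg hjk, if_neg hjd]

theorem lookup_push : ∀ (cs : PChildren) (k j : String) (v : PNode),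
    (cs.push k v).lookup j =
      match cs.lookup j with
      | some c => some c
      | none => if j = k then some v else none
  | .nil, k, j, v => by
    simp [PChildren.push, PChildren.lookup]
  | .cons d c t, k, j, v => by
    by_cases hjd : j = d <;>
      simp_all [PChildren.push, PChildren.lookup, lookup_push t k j v]

theorem lookup_none_iff : ∀ (cs : PChildren) (k : String),
    cs.lookup k = none ↔ k ∉ cs.keys
  | .nil, k => by simp [PChildren.lookup, PChildren.keys]
  | .cons d c t, k => by
    by_cases hkd : k = d <;>
      simp_all [PChildren.lookup, PChildren.keys, lookup_none_iff t k]

theorem children_insertParts_short (r : PNode) (s : List String) (h : ¬ 1 < s.length) :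
    (insertParts r s).children = r.children := by
  cases r with
  | mk fs cs =>
    match s with
    | [] => rfl
    | [f] => rfl
    | d :: e :: tl => simp [List.length_cons] at h

theorem files_insertParts (r : PNode) (s : List String) :
    (insertParts r s).files = r.files ++ (if s.length = 1 then [s.headD ""] else []) := by
  cases r with
  | mk fs cs =>
    match s with
    | [] => simp [insertParts, PNode.files]
    | [f] => simp [insertParts, PNode.files, List.headD]
    | d :: e :: tl =>
      cases hl : cs.lookup d <;>
        simp [insertParts, hl, PNode.files, List.length_cons]

theorem singles_cons (s : List String) (t : List (List String)) :
    singlesOf (s :: t) = (if s.length = 1 then [s.headD ""] else []) ++ singlesOf t := by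
  simp only [singlesOf, List.filterMap_cons]; split <;> simp_all

theorem heads_cons (s : List String) (t : List (List String)) :
    headsOf (s :: t) = (if 1 < s.length then [s.headD ""] else []) ++ headsOf t := by
  simp only [headsOf, List.filterMap_cons]; split <;> simp_all

theorem build_files : ∀ (pss : List (List String)) (r : PNode),
    (List.foldl insertParts r pss).files = r.files ++ singlesOf pss := by
  intro pss
  induction pss with
  | nil => intro r; simp [singlesOf]
  | cons s t ih =>
    intro r
    simp only [List.foldl_cons, ih, files_insertParts, singles_cons, List.append_assoc]

theorem keys_insertParts (r : PNode) (s : List String) :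
    (insertParts r s).children.keys =
      if 1 < s.length ∧ r.children.lookup (s.headD "") = none
      then r.children.keys ++ [s.headD ""] else r.children.keys := by
  cases r with
  | mk fs cs =>
    match s with
    | [] => simp [insertParts, PNode.children, List.length_cons]
    | [f] => simp [insertParts, PNode.children, List.length_cons]
    | d :: e :: tl =>
      cases hl : cs.lookup d <;>
        simp [insertParts, hl, PNode.children, keys_set, keys_push, List.length_cons,
          List.headD]

theorem mem_keys_build : ∀ (pss : List (List String)) (r : PNode) (k : String),
    k ∈ (List.foldl insertParts r pss).children.keys ↔
      k ∈ r.children.keys ∨ k ∈ headsOf pss := by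
  intro pss
  induction pss with
  | nil => intro r k; simp [headsOf]
  | cons s t ih =>
    intro r k
    simp only [List.foldl_cons, ih, keys_insertParts, heads_cons]
    by_cases hmulti : 1 < s.length
    · by_cases hnone : r.children.lookup (s.headD "") = none
      · have hc : 1 < s.length ∧ r.children.lookup (s.headD "") = none := ⟨hmulti, hnone⟩
        rw [if_pos hc, if_pos hmulti]
        simp only [List.mem_append, List.mem_singleton]
        tauto
      · have hmem : s.headD "" ∈ r.children.keys := by
          by_contra hc; exact hnone ((lookup_none_iff _ _).mpr hc)
        have hc2 : ¬ (1 < s.length ∧ r.children.lookup (s.headD "") = none) :=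
          fun hx => hnone hx.2
        rw [if_neg hc2, if_pos hmulti]
        simp only [List.mem_append, List.mem_singleton]
        constructor
        · tauto
        · rintro (hx | hx | hx)
          · tauto
          · subst hx; tauto
          · tauto
    · have hc2 : ¬ (1 < s.length ∧ r.children.lookup (s.headD "") = none) :=
        fun hx => hmulti hx.1
      rw [if_neg hc2, if_neg hmulti]
      simp

theorem nodup_keys_build : ∀ (pss : List (List String)) (r : PNode),
    r.children.keys.Nodup → (List.foldl insertParts r pss).children.keys.Nodup := by
  intro pss
  induction pss with
  | nil => intro r h; exact h
  | cons s t ih =>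
    intro r h
    simp only [List.foldl_cons]
    apply ih
    rw [keys_insertParts]
    split
    · rename_i hc
      have hnm : s.headD "" ∉ r.children.keys := (lookup_none_iff _ _).mp hc.2
      rw [List.nodup_append]
      refine ⟨h, List.nodup_singleton _, ?_⟩
      intro a ha b hb
      rw [List.mem_singleton] at hb
      intro hab
      rw [hab, hb] at ha
      exact hnm ha
    · exact h

theorem build_lookup : ∀ (pss : List (List String)) (r : PNode) (k : String),
    (List.foldl insertParts r pss).children.lookup k =
      match r.children.lookup k with
      | some c => some (List.foldl insertParts c (groupOf k pss))
      | none =>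
        if groupOf k pss = [] then none
        else some (List.foldl insertParts PNode.empty (groupOf k pss)) := by
  intro pss
  induction pss with
  | nil =>
    intro r k
    cases hr : r.children.lookup k <;> simp [groupOf, hr]
  | cons s t ih =>
    intro r k
    simp only [List.foldl_cons]
    by_cases hmulti : 1 < s.length
    · obtain ⟨d, e, tl, rfl⟩ : ∃ d e tl, s = d :: e :: tl := by
        match s with
        | [] => simp at hmulti
        | [f] => simp [List.length_cons] at hmulti
        | d :: e :: tl => exact ⟨d, e, tl, rfl⟩
      cases r with
      | mk fs cs =>
        by_cases hk : k = d
        · subst hk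
          have hcond : 1 < (k :: e :: tl).length ∧ (k :: e :: tl).headD "" = k :=
            ⟨by simp [List.length_cons], rfl⟩
          cases hl : cs.lookup k with
          | some c =>
            rw [show insertParts (PNode.mk fs cs) (k :: e :: tl) =
                  PNode.mk fs (cs.set k (insertParts c (e :: tl))) by
                simp [insertParts, hl]]
            rw [ih]
            simp only [PNode.children, lookup_set, if_pos rfl, hl, Option.map_some,
              PChildren.lookup]
            rw [groupOf_cons, if_pos hcond]
            simp [List.foldl_cons, List.tail_cons]
          | none =>
            rw [show insertParts (PNode.mk fs cs) (k :: e :: tl) =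
                  PNode.mk fs (cs.push k (insertParts PNode.empty (e :: tl))) by
                simp [insertParts, hl]]
            rw [ih]
            simp only [PNode.children, lookup_push, hl, groupOf_cons, if_pos hcond,
              List.tail_cons, if_pos rfl]
            simp [List.foldl_cons]
        · have hstep : (insertParts (PNode.mk fs cs) (d :: e :: tl)).children.lookup k =
              cs.lookup k := by
            cases hl : cs.lookup d with
            | some c =>
              simp only [insertParts, hl, PNode.children, lookup_set]
              rw [if_neg hk]
            | none =>
              simp only [insertParts, hl, PNode.children, lookup_push]
              cases hck : cs.lookup k
              · simp [if_neg hk]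
              · rfl
          rw [ih, hstep]
          have hc : ¬ (1 < (d :: e :: tl).length ∧ (d :: e :: tl).headD "" = k) := by
            simp only [List.headD]; exact fun hx => hk (hx.2.symm)
          rw [groupOf_cons, if_neg hc]
          rfl
    · rw [ih]
      have hch := children_insertParts_short r s hmulti
      have hc : ¬ (1 < s.length ∧ s.headD "" = k) := fun hx => hmulti hx.1
      rw [hch, groupOf_cons, if_neg hc]

theorem groupOf_ne_nil {d : String} {pss : List (List String)}
    (h : ∃ s ∈ pss, 1 < s.length ∧ s.headD "" = d) : groupOf d pss ≠ [] := by
  rcases h with ⟨s, hs, hl, hh⟩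
  have hmem : s.tail ∈ groupOf d pss :=
    List.mem_filterMap.mpr ⟨s, hs, by
      rw [if_pos (show 1 < s.length ∧ s.headD "" = d from ⟨hl, hh⟩)]⟩
  exact List.ne_nil_of_mem hmem

theorem build_keys_perm (pss : List (List String)) :
    (List.foldl insertParts PNode.empty pss).children.keys.Perm
      (PySem.List.dedup (headsOf pss)) := by
  rw [List.perm_ext_iff_of_nodup
    (nodup_keys_build pss PNode.empty (by simp [PNode.empty, PNode.children, PChildren.keys]))
    (PySem.List.nodup_dedup _)]
  intro k
  rw [mem_keys_build, PySem.List.mem_dedup]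
  simp [PNode.empty, PNode.children, PChildren.keys]

theorem sorted_keys_eq_names (pss : List (List String)) :
    PySem.List.sorted (List.foldl insertParts PNode.empty pss).children.keys
      (fun x => x) false = namesOf pss := by
  unfold namesOf
  exact PySem.List.sorted_eq_sorted_of_perm _ _ (fun x => x)
    (fun a b h => h) (build_keys_perm pss)

theorem keys_isEmpty_eq_names (pss : List (List String)) :
    (List.foldl insertParts PNode.empty pss).children.keys.isEmpty =
      (namesOf pss).isEmpty := by
  have h1 := build_keys_perm pss
  have h2 := PySem.List.sorted_perm (PySem.List.dedup (headsOf pss)) (fun x : String => x) false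
  have : (List.foldl insertParts PNode.empty pss).children.keys.length =
      (namesOf pss).length := by
    rw [h1.length_eq]; unfold namesOf; rw [h2.length_eq]
  rcases hk : (List.foldl insertParts PNode.empty pss).children.keys with _ | ⟨a, t⟩ <;>
    rcases hn : namesOf pss with _ | ⟨b, u⟩ <;> simp_all

theorem fileLines_go : ∀ (l : List String) (k : Nat) (b : Bool) (p : String),
    (l.zipIdx k).map (fun fi =>
      if fi.2 = k + l.length - 1 ∧ b = true then p ++ "└── " ++ fi.1
      else p ++ "├── " ++ fi.1) = fileLinesA l b p
  | [], _, _, _ => rfl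
  | [f], k, b, p => by
    rw [List.zipIdx_cons, List.zipIdx_nil, List.map_cons, List.map_nil]
    have hk : k + [f].length - 1 = k := rfl
    cases b <;> simp [fileLinesA, hk]
  | f :: g :: t, k, b, p => by
    rw [List.zipIdx_cons, List.map_cons]
    have hne : ¬ (k = k + (f :: g :: t).length - 1 ∧ b = true) := by
      intro hx
      have : k + (f :: g :: t).length - 1 = k + (t.length + 1) := rfl
      rw [this] at hx
      exact absurd hx.1 (Nat.ne_of_lt (Nat.lt_add_of_pos_right (Nat.succ_pos _)))
    rw [if_neg hne]
    have hlen : k + (f :: g :: t).length - 1 = (k + 1) + (g :: t).length - 1 := by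
      simp only [List.length_cons]; omega
    simp only [hlen]
    rw [fileLines_go (g :: t) (k + 1) b p]
    rfl

theorem fileLines_eq (l : List String) (b : Bool) (p : String) :
    fileLinesA l b p = fileLinesB l b p := by
  unfold fileLinesB
  rw [← fileLines_go l 0 b p]
  have h0 : (0 : Nat) + l.length - 1 = l.length - 1 := by rw [Nat.zero_add]
  simp only [h0]

theorem build_lookup_mem {d : String} {pss : List (List String)} (h : d ∈ namesOf pss) :
    (List.foldl insertParts PNode.empty pss).children.lookup d =
      some (List.foldl insertParts PNode.empty (groupOf d pss)) := by
  rw [build_lookup]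
  simp only [PNode.empty, PNode.children, PChildren.lookup]
  rw [if_neg (groupOf_ne_nil (mem_namesOf h))]

theorem render_eq : ∀ (N : Nat) (pss : List (List String)) (pre : String),
    sumM pss ≤ N →
    renderA (List.foldl insertParts PNode.empty pss) pre "" = renderB pre pss := by
  intro N
  induction N using Nat.strong_induction_on with
  | _ N ihN =>
    intro pss pre h
    rw [renderA, renderB]
    have hfiles : (List.foldl insertParts PNode.empty pss).files = singlesOf pss := by
      rw [build_files]; simp [PNode.empty, PNode.files]
    have hinner : ∀ (l : List {d : String // d ∈ namesOf pss}) (pre2 : String),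
        renderDirsA (List.foldl insertParts PNode.empty pss).children
          (l.map Subtype.val) pre2 = goB pre2 pss l := by
      intro l
      induction l with
      | nil => intro pre2; rw [List.map_nil, renderDirsA.eq_1, goB.eq_1]
      | cons x l2 ihl =>
        intro pre2
        obtain ⟨d, hd⟩ := x
        have hlk := build_lookup_mem hd
        have hrec : ∀ pre3 : String,
            renderA (List.foldl insertParts PNode.empty (groupOf d pss)) pre3 "" =
              renderB pre3 (groupOf d pss) := by
          intro pre3
          have hlt := sumM_groupOf_lt d pss (mem_namesOf hd)
          exact ihN (sumM (groupOf d pss)) (by omega) _ _ (Nat.le_refl _)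
        cases l2 with
        | nil =>
          rw [List.map_cons, List.map_nil, renderDirsA.eq_2, goB.eq_2]
          congr 1
          split
          · rename_i c heq
            rw [hlk] at heq
            cases heq
            exact hrec _
          · rename_i heq
            rw [hlk] at heq
            cases heq
        | cons y l3 =>
          obtain ⟨e, he⟩ := y
          rw [List.map_cons, List.map_cons, renderDirsA.eq_3, goB.eq_3,
            ← ihl pre2, List.map_cons]
          simp only [List.cons_append]
          congr 2
          split
          · rename_i c heq
            rw [hlk] at heq
            cases heq
            exact hrec _
          · rename_i heq
            rw [hlk] at heq
            cases heq
    have hmain := hinner (namesOf pss).attach pre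
    rw [List.attach_map_subtype_val] at hmain
    rw [hfiles, keys_isEmpty_eq_names, sorted_keys_eq_names, fileLines_eq, hmain]
    simp

-- ===== VERDICT (by name: the statement is the Claim_ definition above) =====
theorem format_project_structure_spec : Claim_equal_format_project_structure := by
  intro fps _hdom _hpre
  unfold Spec_format_project_structure format_project_structure format_project_structure_alt
  have hfold : fps.foldl
      (fun cur p => insertParts cur ((PySem.Str.split? (PySem.Str.replace p "\\" "/") "/").getD []))
      PNode.empty = List.foldl insertParts PNode.empty (fps.map segs) := by
    rw [List.foldl_map]
    rfl
  rw [hfold]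
  show PySem.Str.join "\n"
      (renderA (List.foldl insertParts PNode.empty (fps.map segs)) "" "") =
    PySem.Str.join "\n" (renderB "" (fps.map segs))
  rw [render_eq (sumM (fps.map segs)) (fps.map segs) "" (Nat.le_refl _)]
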